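-- pv_equiv track=rewrite | github.com/M-Raef/Traffic-Violation-Detector | models/traffic_light.py | determine_dominant_light
-- ===== SOURCE A (Python) =====
-- def determine_dominant_light(traffic_lights):
--     """
--     Determine the dominant traffic light color from a list of detected lights.
--
--     Args:
--         traffic_lights: List of traffic light dictionaries with 'color' and 'conf' keys
--
--     Returns:
--         str: Dominant traffic light color ('red', 'green', 'yellow', or 'unknown')
--     """
--     if not traffic_lights:
--         return "unknown"
--
--     # Prioritize red lights for safety
--     red_lights = [light for light in traffic_lights if light["color"] == "red"]
--     if red_lights:
--         return "red"
--
--     # Then green lights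
--     green_lights = [light for light in traffic_lights if light["color"] == "green"]
--     if green_lights:
--         return "green"
--
--     # Then yellow lights
--     yellow_lights = [light for light in traffic_lights if light["color"] == "yellow"]
--     if yellow_lights:
--         return "yellow"
--
--     # If no clear color is detected
--     return "unknown"
-- ===== SOURCE B (Python) =====
-- def determine_dominant_light(traffic_lights):
--     if not traffic_lights:
--         return "unknown"
--     colors = set()
--     for light in traffic_lights:
--         colors.add(light["color"])
--     for color in ("red", "green", "yellow"):
--         if color in colors:
--             return color
--     return "unknown"
-- ===== Notes on version B (the rewrite author's own statement) =====
-- stated objective: simpler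
-- what changed: Three separate full-list comprehensions (one per color) are replaced by a single pass collecting the set of colors seen, followed by a priority membership scan over ('red','green','yellow').
import Mathlib
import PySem

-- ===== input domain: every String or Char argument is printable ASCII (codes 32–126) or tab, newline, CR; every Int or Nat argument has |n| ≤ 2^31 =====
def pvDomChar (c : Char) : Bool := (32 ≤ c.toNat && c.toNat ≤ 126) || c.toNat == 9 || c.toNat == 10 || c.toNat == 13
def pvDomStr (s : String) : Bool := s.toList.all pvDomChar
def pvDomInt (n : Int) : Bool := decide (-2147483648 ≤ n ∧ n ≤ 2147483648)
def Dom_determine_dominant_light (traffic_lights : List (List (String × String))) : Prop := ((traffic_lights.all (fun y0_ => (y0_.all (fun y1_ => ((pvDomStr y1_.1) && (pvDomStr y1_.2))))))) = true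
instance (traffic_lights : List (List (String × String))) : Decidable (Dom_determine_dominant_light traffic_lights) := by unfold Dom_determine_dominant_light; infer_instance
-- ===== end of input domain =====

-- B replaces A's three per-color full-list comprehensions by one pass collecting the set of
-- colors seen, then a priority membership scan; objective: simpler.

-- ===== PORT A =====
-- light["color"] on the assoc-list dict: first matching key (exact Python dict lookup; none = KeyError)
def pvColor? (light : List (String × String)) : Option String :=
  (light.find? (fun kv => kv.1 == "color")).map Prod.snd

def determine_dominant_light (traffic_lights : List (List (String × String))) : String :=
  if traffic_lights = [] then "unknown"
  else
    -- light["color"] == "red": exact under Pre_ (key present); a missing key raises in Python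
    let red_lights := traffic_lights.filter (fun light => pvColor? light == some "red")
    if red_lights ≠ [] then "red"
    else
      let green_lights := traffic_lights.filter (fun light => pvColor? light == some "green")
      if green_lights ≠ [] then "green"
      else
        let yellow_lights := traffic_lights.filter (fun light => pvColor? light == some "yellow")
        if yellow_lights ≠ [] then "yellow"
        else "unknown"

-- ===== PORT B =====
def determine_dominant_light_alt (traffic_lights : List (List (String × String))) : String :=
  if traffic_lights = [] then "unknown"
  else
    -- colors.add(light["color"]): exact under Pre_ (key present; getD "" totalizes the lookup)
    let colors := traffic_lights.foldl
      (fun s light => PySem.Set.add s ((pvColor? light).getD "")) PySem.Set.empty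
    (["red", "green", "yellow"].find? (fun c => PySem.Set.contains colors c)).getD "unknown"

-- ===== PRECONDITION & SPEC =====
-- Pre_ excludes exactly the inputs on which Python A raises KeyError: a light without a "color" key.
def Pre_determine_dominant_light (traffic_lights : List (List (String × String))) : Prop :=
  ∀ light ∈ traffic_lights, "color" ∈ light.map Prod.fst
instance (traffic_lights : List (List (String × String))) : Decidable (Pre_determine_dominant_light traffic_lights) := by
  unfold Pre_determine_dominant_light; infer_instance
def pvWitness_determine_dominant_light : (List (List (String × String))) :=
  [[("color", "red"), ("conf", "0.9")], [("color", "green")]]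

def Spec_determine_dominant_light (traffic_lights : List (List (String × String))) (out : String) : Prop := out = determine_dominant_light_alt traffic_lights
instance (traffic_lights : List (List (String × String))) (out : String) : Decidable (Spec_determine_dominant_light traffic_lights out) := by unfold Spec_determine_dominant_light; infer_instance

-- ===== CLAIM (what is proved, stated in full; the proofs are below) =====
def Claim_equal_determine_dominant_light : Prop := ∀ (traffic_lights : List (List (String × String))), Dom_determine_dominant_light traffic_lights → Pre_determine_dominant_light traffic_lights → Spec_determine_dominant_light traffic_lights (determine_dominant_light traffic_lights)

-- ===== LEMMAS AND PROOFS =====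

-- membership in B's color set ↔ some light has that color (for colors ≠ "", the totalization default)
lemma mem_colors_iff (tl : List (List (String × String))) (c : String) (hc : c ≠ "") :
    (c ∈ tl.foldl (fun s light => PySem.Set.add s ((pvColor? light).getD "")) PySem.Set.empty)
      ↔ ∃ l ∈ tl, pvColor? l = some c := by
  rw [PySem.Set.mem_foldl_add (f := fun light => (pvColor? light).getD "")]
  simp only [PySem.Set.empty, List.not_mem_nil, false_or]
  constructor
  · rintro ⟨l, hl, hcl⟩
    refine ⟨l, hl, ?_⟩
    cases h : pvColor? l with
    | none => rw [h] at hcl; simp at hcl; exact absurd hcl hc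
    | some v => rw [h] at hcl; simp at hcl; rw [hcl]
  · rintro ⟨l, hl, hcl⟩
    exact ⟨l, hl, by rw [hcl]; rfl⟩

lemma filter_color_ne_nil_iff (tl : List (List (String × String))) (c : String) :
    tl.filter (fun light => pvColor? light == some c) ≠ []
      ↔ ∃ l ∈ tl, pvColor? l = some c := by
  rw [← List.isEmpty_eq_false_iff, List.isEmpty_eq_false_iff_exists_mem]
  simp [List.mem_filter]

-- ===== VERDICT (by name: the statement is the Claim_ definition above) =====
theorem determine_dominant_light_spec : Claim_equal_determine_dominant_light := by
  intro tl _ _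
  unfold Spec_determine_dominant_light determine_dominant_light determine_dominant_light_alt
  by_cases hnil : tl = []
  · simp [hnil]
  · simp only [hnil, if_false]
    have hred := (mem_colors_iff tl "red" (by decide)).trans (filter_color_ne_nil_iff tl "red").symm
    have hgreen := (mem_colors_iff tl "green" (by decide)).trans (filter_color_ne_nil_iff tl "green").symm
    have hyellow := (mem_colors_iff tl "yellow" (by decide)).trans (filter_color_ne_nil_iff tl "yellow").symm
    by_cases hr : tl.filter (fun light => pvColor? light == some "red") ≠ []
    · have mr := hred.mpr hr
      simp only [PySem.Set.empty] at *
      simp [hr, mr]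
    · have mr : "red" ∉ tl.foldl (fun s light => PySem.Set.add s ((pvColor? light).getD "")) PySem.Set.empty :=
        fun h => hr (hred.mp h)
      by_cases hg : tl.filter (fun light => pvColor? light == some "green") ≠ []
      · have mg := hgreen.mpr hg
        simp only [PySem.Set.empty] at *
        simp [hr, hg, mr, mg]
      · have mg : "green" ∉ tl.foldl (fun s light => PySem.Set.add s ((pvColor? light).getD "")) PySem.Set.empty :=
          fun h => hg (hgreen.mp h)
        by_cases hy : tl.filter (fun light => pvColor? light == some "yellow") ≠ []
        · have my := hyellow.mpr hy
          simp only [PySem.Set.empty] at *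
          simp [hr, hg, hy, mr, mg, my]
        · have my : "yellow" ∉ tl.foldl (fun s light => PySem.Set.add s ((pvColor? light).getD "")) PySem.Set.empty :=
            fun h => hy (hyellow.mp h)
          simp only [PySem.Set.empty] at *
          simp [hr, hg, hy, mr, mg, my]
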